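-- pv_equiv track=rewrite | github.com/streltcov/codewars_solutions | python/kyu6_encrypt_this.py | encrypt_this
-- ===== SOURCE A (Python) =====
-- def encrypt_this(text):
--     """
--     :param text: string parameter; a sentence containing several words, each of which must be encrypted according
--     to the specified rules
--     :type text: str
--     :rtype: str
--     :return: encrypted sentence
--     """
--     encrypted = ''
--     text = text.split()
--     for word in text:
--         first_char, word = str(ord(word[:1])), word[1:]
--         second_char, word = word[:1], word[1:]
--         last_char, word = word[-1:], word[:-1]
--         encrypted += first_char + last_char + word + second_char + ' '
--     return encrypted[:-1]
-- ===== SOURCE B (Python) =====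
-- def encrypt_this(text):
--     # Single left-to-right scan over the characters (no split, no slices):
--     # words are tokenized by hand, and each encrypted word is emitted
--     # position-by-position via an index permutation j(i).
--     out = []
--     word = []
--     for ch in text + ' ':
--         if ch.isspace():
--             if word:
--                 if out:
--                     out.append(' ')
--                 out.append(str(ord(word[0])))
--                 n = len(word)
--                 for i in range(1, n):
--                     j = n - 1 if i == 1 else (1 if i == n - 1 else i)
--                     out.append(word[j])
--                 word = []
--         else:
--             word.append(ch)
--     return ''.join(out)
-- ===== Notes on version B (the rewrite author's own statement) =====
-- stated objective: alternative
-- what changed: A splits the text, then peels each word apart with four destructive slice re-bindings and accumulates every encrypted word with a trailing space into a string trimmed at the end; B never calls split or takes a slice: it tokenizes in one hand-written character scan with a pending-word buffer and emits each encrypted word position-by-position through an index permutation j(i), writing the separator before every word but the first.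
import Mathlib
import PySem

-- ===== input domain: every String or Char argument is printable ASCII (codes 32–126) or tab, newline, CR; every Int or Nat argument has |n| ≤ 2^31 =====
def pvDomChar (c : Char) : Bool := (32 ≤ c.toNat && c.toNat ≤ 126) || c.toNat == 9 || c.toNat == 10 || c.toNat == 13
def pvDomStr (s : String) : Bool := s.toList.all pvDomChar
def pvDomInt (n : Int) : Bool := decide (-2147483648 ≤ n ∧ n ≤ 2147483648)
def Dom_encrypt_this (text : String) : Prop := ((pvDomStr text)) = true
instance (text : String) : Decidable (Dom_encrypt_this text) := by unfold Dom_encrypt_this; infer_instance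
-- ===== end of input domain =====

-- B replaces A's split()/per-word slice-peeling/'+= … + " "'/trim pipeline by ONE
-- left-to-right scan over the characters: words are tokenized by hand and each
-- encrypted word is emitted position-by-position through an index permutation,
-- with the separator written before every word but the first (objective: alternative).
-- Equivalence of the return values is proved for all inputs (both are total).

-- ===== PORT A =====
-- str(ord(cs)) — Python's ord raises unless the string has exactly one char;
-- split() never yields such a word here, so the [] branch is unreachable in A.
def pvOrdStrA (cs : List Char) : List Char :=
  match cs with
  | [c] => PySem.Int.toChars (c.toNat : Int)
  | _ => []

def encrypt_this (text : String) : String :=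
  let ws := PySem.Chars.split₀ text.toList
  let encrypted := ws.foldl (fun acc word =>
    -- first_char, word = str(ord(word[:1])), word[1:]
    let first_char := pvOrdStrA (PySem.List.slice word none (some 1))
    let word := PySem.List.slice word (some 1) none
    -- second_char, word = word[:1], word[1:]
    let second_char := PySem.List.slice word none (some 1)
    let word := PySem.List.slice word (some 1) none
    -- last_char, word = word[-1:], word[:-1]
    let last_char := PySem.List.slice word (some (-1)) none
    let word := PySem.List.slice word none (some (-1))
    acc ++ first_char ++ last_char ++ word ++ second_char ++ [' ']) []
  String.ofList (PySem.List.slice encrypted none (some (-1)))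

-- ===== PORT B =====
-- str(ord(word[0])) — word is nonempty whenever the flush body runs ('if word:'),
-- so the [] branch is unreachable.
def pvOrdHeadB (word : List Char) : List Char :=
  match word with
  | c :: _ => PySem.Int.toChars (c.toNat : Int)
  | [] => []

-- the 'if word:' body: emit ' ' unless out is empty, then str(ord(word[0])), then
-- word[j] for i in range(1, n), j = n-1 if i==1 else 1 if i==n-1 else i
-- (word[j] is a valid index for every generated i, so the 'none' arm never fires)
def pvFlushB (out word : List Char) : List Char :=
  if word.isEmpty then out
  else
    let out := if out.isEmpty then out else out ++ [' ']
    let out := out ++ pvOrdHeadB word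
    let n : Int := word.length
    (PySem.List.pyRange 1 n 1).foldl (fun o i =>
      let j : Int := if i = 1 then n - 1 else if i = n - 1 then 1 else i
      o ++ (match PySem.List.pyGet? word j with
            | some c => [c]
            | none => [])) out

def encrypt_this_alt (text : String) : String :=
  String.ofList
    (((text.toList ++ [' ']).foldl
        (fun (st : List Char × List Char) ch =>
          if PySem.Chars.isspace ch then (pvFlushB st.1 st.2, [])
          else (st.1, st.2 ++ [ch]))
        ([], [])).1)

-- ===== PRECONDITION & SPEC =====
def Spec_encrypt_this (text : String) (out : String) : Prop := out = encrypt_this_alt text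
instance (text : String) (out : String) : Decidable (Spec_encrypt_this text out) := by unfold Spec_encrypt_this; infer_instance

-- ===== CLAIM (what is proved, stated in full; the proofs are below) =====
def Claim_equal_encrypt_this : Prop := ∀ (text : String), Dom_encrypt_this text → Spec_encrypt_this text (encrypt_this text)

-- ===== LEMMAS AND PROOFS =====

-- the common per-word value both proofs converge to
def pvSwapEnds (tail : List Char) : List Char :=
  match tail with
  | [] => []
  | [x] => [x]
  | x :: rest => rest.getLastD x :: (rest.dropLast ++ [x])

def pvEncWord (word : List Char) : List Char :=
  match word with
  | [] => []
  | c :: tail => PySem.Int.toChars (c.toNat : Int) ++ pvSwapEnds tail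

-- clean recursive description of str.split() with a pending word
def pvW (cur : List Char) : List Char → List (List Char)
  | [] => if cur.isEmpty then [] else [cur]
  | c :: rest =>
      if PySem.Chars.isspace c then (if cur.isEmpty then [] else [cur]) ++ pvW [] rest
      else pvW (cur ++ [c]) rest

def pvEmit (out : List Char) (ws : List (List Char)) : List Char := ws.foldl pvFlushB out

lemma pv_emit_append (out : List Char) (a b : List (List Char)) :
    pvEmit out (a ++ b) = pvEmit (pvEmit out a) b := by
  simp [pvEmit, List.foldl_append]

-- ---- A-side lemmas ----
lemma pv_drop_pred_length {α : Type} (x d : α) (rest : List α) :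
    (x :: rest).drop ((x :: rest).length - 1) = [(x :: rest).getLastD d] := by
  induction rest generalizing x with
  | nil => simp
  | cons y t ih => simpa using ih y

lemma pv_word_core (word : List Char) :
    pvOrdStrA (PySem.List.slice word none (some 1)) ++
      PySem.List.slice (PySem.List.slice (PySem.List.slice word (some 1) none) (some 1) none) (some (-1)) none ++
      PySem.List.slice (PySem.List.slice (PySem.List.slice word (some 1) none) (some 1) none) none (some (-1)) ++
      PySem.List.slice (PySem.List.slice word (some 1) none) none (some 1)
    = pvEncWord word := by
  have hs : ∀ (xs : List Char), PySem.List.slice xs none (some 1) = xs.take 1 := by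
    intro xs; simp [pysem]
  simp only [hs, PySem.List.slice_from_one, PySem.List.slice_to_neg_one,
    PySem.List.slice_from_neg_one]
  cases word with
  | nil => simp [pvOrdStrA, pvEncWord]
  | cons c t =>
    simp only [List.take_succ_cons, List.take_zero, List.tail_cons, pvOrdStrA, pvEncWord]
    cases t with
    | nil => simp [pvSwapEnds]
    | cons x rest =>
      cases rest with
      | nil => simp [pvSwapEnds]
      | cons y r =>
        rw [List.tail_cons, pv_drop_pred_length y x r]
        simp [pvSwapEnds, List.append_assoc]

lemma pv_word_eq (acc word : List Char) :
    acc ++ pvOrdStrA (PySem.List.slice word none (some 1)) ++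
      PySem.List.slice (PySem.List.slice (PySem.List.slice word (some 1) none) (some 1) none) (some (-1)) none ++
      PySem.List.slice (PySem.List.slice (PySem.List.slice word (some 1) none) (some 1) none) none (some (-1)) ++
      PySem.List.slice (PySem.List.slice word (some 1) none) none (some 1) ++ [' ']
    = acc ++ (pvEncWord word ++ [' ']) := by
  rw [← pv_word_core word]
  simp [List.append_assoc]

lemma pv_join_eq (ws : List (List Char)) (g : List Char → List Char) :
    (ws.foldl (fun acc w => acc ++ (g w ++ [' '])) []).dropLast
      = PySem.Chars.join [' '] (ws.map g) := by
  rw [PySem.List.foldl_append_eq_flatMap]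
  rw [List.nil_append]
  induction ws with
  | nil => simp [PySem.Chars.join_nil]
  | cons w rest ih =>
    cases rest with
    | nil => simp [PySem.Chars.join_singleton]
    | cons w2 rest2 =>
      rw [List.map_cons, List.map_cons, PySem.Chars.join_cons_cons,
        List.flatMap_cons, ← List.map_cons, ← ih]
      have hne : (w2 :: rest2).flatMap (fun w => g w ++ [' ']) ≠ [] := by
        simp [List.flatMap_cons]
      rw [List.dropLast_append_of_ne_nil hne]

lemma pv_A_join (text : String) :
    encrypt_this text
      = String.ofList (PySem.Chars.join [' ']
          ((PySem.Chars.split₀ text.toList).map pvEncWord)) := by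
  simp only [encrypt_this]
  have hfold := PySem.List.foldl_congr_mem
      (l := PySem.Chars.split₀ text.toList)
      (init := ([] : List Char))
      (f := fun acc word =>
        acc ++ pvOrdStrA (PySem.List.slice word none (some 1)) ++
          PySem.List.slice (PySem.List.slice (PySem.List.slice word (some 1) none) (some 1) none) (some (-1)) none ++
          PySem.List.slice (PySem.List.slice (PySem.List.slice word (some 1) none) (some 1) none) none (some (-1)) ++
          PySem.List.slice (PySem.List.slice word (some 1) none) none (some 1) ++ [' '])
      (g := fun acc w => acc ++ (pvEncWord w ++ [' ']))
      (fun acc w _ => pv_word_eq acc w)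
  rw [hfold, PySem.List.slice_to_neg_one, pv_join_eq]

-- ---- B-side lemmas: the inner index loop builds pvSwapEnds of the tail ----

lemma pv_flatMap_singleton {α β : Type} (f : α → β) (l : List α) :
    l.flatMap (fun x => [f x]) = l.map f := by
  induction l with
  | nil => rfl
  | cons a t ih => simp [List.flatMap_cons, ih]

lemma pv_range_eq (m : Nat) :
    PySem.List.pyRange 1 ((m : Int) + 1) 1 = (List.range m).map (fun (k : Nat) => ((k : Int) + 1)) := by
  simp only [PySem.List.pyRange, one_ne_zero, if_false]
  norm_num
  cases m with
  | zero => norm_num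
  | succ p =>
    rw [if_pos (Nat.succ_pos p)]
    exact List.map_congr_left (fun a _ => by ring)

lemma pv_map_swap (c : Char) (t : List Char) :
    (List.range t.length).map (fun k =>
        (t[(if k = 0 then t.length - 1 else if k = t.length - 1 then 0 else k)]?).getD c)
      = pvSwapEnds t := by
  match t with
  | [] => rfl
  | [x] => simp [pvSwapEnds]
  | x :: y :: r =>
    simp only [pvSwapEnds]
    apply List.ext_getElem
    · simp
    · intro i h1 h2
      simp only [List.length_map, List.length_range] at h1
      simp only [List.getElem_map, List.getElem_range]
      by_cases h0 : i = 0
      · subst h0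
        rw [if_pos rfl]
        rw [List.getElem?_eq_getElem (by simp)]
        simp only [Option.getD_some, List.getElem_cons_zero]
        rw [List.getLastD_eq_getLast?, List.getLast?_eq_getElem?]
        rw [List.getElem?_eq_getElem (by simp)]
        simp only [Option.getD_some]
        have hidx : (x :: y :: r).length - 1 = ((y :: r).length - 1) + 1 := by simp
        simp only [hidx, List.getElem_cons_succ]
        rfl
      · rw [if_neg h0]
        rw [List.getElem_cons]
        rw [dif_neg h0]
        by_cases hl : i = (x :: y :: r).length - 1
        · rw [if_pos hl]
          rw [List.getElem?_eq_getElem (by simp)]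
          simp only [Option.getD_some, List.getElem_cons_zero]
          rw [List.getElem_append]
          rw [dif_neg (by simp at h1 hl ⊢; omega)]
          simp
        · rw [if_neg hl]
          rw [List.getElem?_eq_getElem (by simpa using h1)]
          simp only [Option.getD_some]
          rw [List.getElem_append]
          rw [dif_pos (by simp at h1 hl ⊢; omega)]
          rw [List.getElem_dropLast]
          rw [List.getElem_cons]
          rw [dif_neg h0]

lemma pv_pick_eq (c : Char) (t : List Char) (k : Nat) (hk : k < t.length) :
    (match PySem.List.pyGet? (c :: t)
        (if (k : Int) + 1 = 1 then (t.length : Int) + 1 - 1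
         else if (k : Int) + 1 = (t.length : Int) + 1 - 1 then 1 else (k : Int) + 1) with
     | some ch => [ch]
     | none => ([] : List Char))
    = [(t[(if k = 0 then t.length - 1 else if k = t.length - 1 then 0 else k)]?).getD c] := by
  by_cases h0 : k = 0
  · subst h0
    rw [if_pos (by norm_num), if_pos rfl]
    have h1 : ((t.length : Int) + 1 - 1) = ((t.length : Nat) : Int) := by ring
    rw [h1, PySem.List.pyGet?_natCast]
    obtain ⟨p, hp⟩ : ∃ p, t.length = p + 1 := ⟨t.length - 1, by omega⟩
    rw [hp, List.getElem?_cons_succ]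
    rw [List.getElem?_eq_getElem (by omega)]
    have hpp : p + 1 - 1 = p := rfl
    rw [hpp, List.getElem?_eq_getElem (by omega)]
    rfl
  · rw [if_neg (by omega), if_neg h0]
    by_cases hl : k = t.length - 1
    · rw [if_pos (by omega), if_pos hl]
      have h1 : (1 : Int) = ((1 : Nat) : Int) := by norm_num
      rw [h1, PySem.List.pyGet?_natCast, List.getElem?_cons_succ]
      rw [List.getElem?_eq_getElem (by omega)]
      rfl
    · rw [if_neg (by omega), if_neg hl]
      have h1 : ((k : Int) + 1) = ((k + 1 : Nat) : Int) := by push_cast; ring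
      rw [h1, PySem.List.pyGet?_natCast, List.getElem?_cons_succ]
      rw [List.getElem?_eq_getElem hk]
      rfl

lemma pv_flush_enc (out word : List Char) (hw : word ≠ []) :
    pvFlushB out word = (if out.isEmpty then out else out ++ [' ']) ++ pvEncWord word := by
  match word with
  | [] => exact absurd rfl hw
  | c :: t =>
    simp only [pvFlushB, List.isEmpty_cons, Bool.false_eq_true, if_false]
    rw [PySem.List.foldl_append_eq_flatMap]
    have hn : (((c :: t).length : Nat) : Int) = (t.length : Int) + 1 := by
      push_cast [List.length_cons]; ring
    rw [hn, pv_range_eq]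
    rw [List.flatMap_def, List.map_map]
    simp only [Function.comp_def]
    rw [List.map_congr_left (fun k hk => pv_pick_eq c t k (by simpa using hk))]
    rw [← List.flatMap_def, pv_flatMap_singleton, pv_map_swap]
    simp [pvEncWord, pvOrdHeadB, List.append_assoc]

-- ---- B-side lemmas: nonemptiness of words and of the encrypted head ----

lemma pv_toDigitsCore_len (b fuel n : Nat) (acc : List Char) :
    acc.length + 1 ≤ (Nat.toDigitsCore b (fuel + 1) n acc).length := by
  induction fuel generalizing n acc with
  | zero =>
    simp only [Nat.toDigitsCore]
    split <;> simp
  | succ f ih =>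
    simp only [Nat.toDigitsCore]
    split
    · simp
    · exact le_trans (by simp) (ih (n / b) ((n % b).digitChar :: acc))

lemma pv_toChars_ne_nil (n : Int) : PySem.Int.toChars n ≠ [] := by
  unfold PySem.Int.toChars
  split
  · simp
  · have h := pv_toDigitsCore_len 10 n.toNat n.toNat []
    simp only [List.length_nil] at h
    intro hco
    unfold Nat.toDigits at hco
    rw [hco] at h
    simp at h

lemma pv_encWord_ne_nil (w : List Char) (hw : w ≠ []) : pvEncWord w ≠ [] := by
  cases w with
  | nil => exact absurd rfl hw
  | cons c t =>
    simp only [pvEncWord]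
    intro h
    exact pv_toChars_ne_nil _ (List.append_eq_nil_iff.mp h).1

-- every word split() yields is nonempty
lemma pv_W_ne_nil (rest cur : List Char) : ∀ w ∈ pvW cur rest, w ≠ [] := by
  induction rest generalizing cur with
  | nil =>
    intro w hw
    simp only [pvW] at hw
    split at hw
    · simp at hw
    · next h =>
      simp at hw; subst hw
      simpa [List.isEmpty_iff] using h
  | cons c rest ih =>
    intro w hw
    simp only [pvW] at hw
    split at hw
    · rcases List.mem_append.mp hw with h | h
      · split at h
        · simp at h
        · next hc =>
          simp at h; subst h
          simpa [List.isEmpty_iff] using hc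
      · exact ih [] w h
    · exact ih _ w hw

-- ---- B-side lemmas: split₀.go is pvW ----

lemma pv_go_acc (rest cur : List Char) (acc : List (List Char)) :
    PySem.Chars.split₀.go rest cur acc = acc.reverse ++ PySem.Chars.split₀.go rest cur [] := by
  induction rest generalizing cur acc with
  | nil =>
    simp only [PySem.Chars.split₀.go]
    split <;> simp
  | cons c rest ih =>
    simp only [PySem.Chars.split₀.go]
    split
    · split
      · rw [ih [] acc]
      · rw [ih [] (cur.reverse :: acc), ih [] [cur.reverse]]
        simp
    · exact ih _ _

lemma pv_go_W (rest : List Char) : ∀ cur : List Char,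
    PySem.Chars.split₀.go rest cur [] = pvW cur.reverse rest := by
  induction rest with
  | nil =>
    intro cur
    simp only [PySem.Chars.split₀.go, pvW]
    cases cur <;> simp
  | cons c rest ih =>
    intro cur
    simp only [PySem.Chars.split₀.go, pvW]
    split
    · split
      · next h =>
        rw [ih []]
        simp [List.isEmpty_iff.mp h]
      · next h =>
        rw [pv_go_acc, ih []]
        have hcur : cur ≠ [] := by simpa [List.isEmpty_iff] using h
        have hne : cur.reverse.isEmpty = false := by
          simp [hcur]
        simp [hne]
    · simpa using ih (c :: cur)

lemma pv_split_W (s : List Char) : PySem.Chars.split₀ s = pvW [] s := by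
  simpa using pv_go_W s []

-- ---- B-side lemmas: the character machine computes pvEmit over the words ----

lemma pv_machine (rest : List Char) : ∀ word out : List Char,
    ((rest ++ [' ']).foldl
        (fun (st : List Char × List Char) ch =>
          if PySem.Chars.isspace ch then (pvFlushB st.1 st.2, [])
          else (st.1, st.2 ++ [ch]))
        (out, word)).1 = pvEmit out (pvW word rest) := by
  have hsp : PySem.Chars.isspace ' ' = true := by decide
  induction rest with
  | nil =>
    intro word out
    simp only [List.nil_append, List.foldl_cons, List.foldl_nil, hsp, if_true]
    simp only [pvW, pvEmit]
    split
    · next h => simp [pvFlushB, h]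
    · simp
  | cons c rest ih =>
    intro word out
    simp only [List.cons_append, List.foldl_cons, pvW]
    by_cases hc : PySem.Chars.isspace c = true
    · simp only [hc, if_true]
      rw [ih, pv_emit_append]
      congr 1
      split
      · next h => simp [pvFlushB, h, pvEmit]
      · simp [pvEmit]
    · simp only [hc]
      simp only [Bool.false_eq_true, if_false]
      exact ih _ _

-- ---- B-side lemmas: pvEmit over nonempty words is the space-join ----

lemma pv_emit_tail (ws : List (List Char)) : ∀ out : List Char, out ≠ [] →
    (∀ w ∈ ws, w ≠ []) →
    pvEmit out ws = out ++ ws.flatMap (fun w => ' ' :: pvEncWord w) := by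
  induction ws with
  | nil => intro out _ _; simp [pvEmit]
  | cons w rest ih =>
    intro out ho hw
    have hw0 := hw w (by simp)
    rw [pvEmit, List.foldl_cons, ← pvEmit, pv_flush_enc out w hw0]
    have ho' : out.isEmpty = false := by simpa [List.isEmpty_iff] using ho
    rw [ho']
    simp only [Bool.false_eq_true, if_false]
    rw [ih _ (by simp) (fun x hx => hw x (by simp [hx]))]
    simp [List.flatMap_cons, List.append_assoc]

lemma pv_join_flat (w : List Char) (ws : List (List Char)) :
    PySem.Chars.join [' '] ((w :: ws).map pvEncWord)
      = pvEncWord w ++ ws.flatMap (fun v => ' ' :: pvEncWord v) := by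
  induction ws generalizing w with
  | nil => simp [PySem.Chars.join_singleton]
  | cons w2 r ih =>
    rw [List.map_cons, List.map_cons, PySem.Chars.join_cons_cons,
      ← List.map_cons, ih w2]
    simp [List.flatMap_cons, List.append_assoc]

lemma pv_emit_join (ws : List (List Char)) (hw : ∀ w ∈ ws, w ≠ []) :
    pvEmit [] ws = PySem.Chars.join [' '] (ws.map pvEncWord) := by
  cases ws with
  | nil => simp [pvEmit, PySem.Chars.join_nil]
  | cons w rest =>
    have hw0 := hw w (by simp)
    rw [pvEmit, List.foldl_cons, ← pvEmit, pv_flush_enc [] w hw0]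
    rw [if_pos (by simp)]
    rw [pv_emit_tail _ _ (by simpa using pv_encWord_ne_nil w hw0)
      (fun x hx => hw x (by simp [hx]))]
    rw [pv_join_flat]
    simp

-- ===== VERDICT (by name: the statement is the Claim_ definition above) =====
theorem encrypt_this_spec : Claim_equal_encrypt_this := by
  intro text _
  show _ = _
  rw [pv_A_join]
  simp only [encrypt_this_alt]
  rw [pv_machine, ← pv_split_W,
    pv_emit_join _ (by rw [pv_split_W]; exact pv_W_ne_nil _ _)]
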